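-- pv_equiv track=rewrite | github.com/manwar/perlweeklychallenge-club | challenge-371/roger-bell-west/python/ch-2.py | subsetequilibrium
-- ===== SOURCE A (Python) =====
-- from itertools import combinations
--
-- def subsetequilibrium(a):
--   out = []
--   b = [x - i - 1 for i, x in enumerate(a)]
--   ix = list(range(len(b)))
--   for n in range(1, len(b)):
--     for iy in combinations(ix, n):
--       bp = [b[i] for i in iy]
--       if sum(bp) == 0:
--         ap = [a[i] for i in iy]
--         out.append(ap)
--   out.sort()
--   return out
-- ===== SOURCE B (Python) =====
-- def subsetequilibrium(a):
--     n = len(a)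
--     b = [x - i - 1 for i, x in enumerate(a)]
--     half = n // 2
--
--     def subsets(vals, ws):
--         # all subsets of the (vals, ws) pairs, kept as (chosen vals, sum of chosen ws)
--         res = [([], 0)]
--         for v, w in zip(vals, ws):
--             res = res + [(s + [v], t + w) for (s, t) in res]
--         return res
--
--     left = subsets(a[:half], b[:half])
--     right = subsets(a[half:], b[half:])
--     index = {}
--     for s, t in right:
--         index[t] = index.get(t, []) + [s]
--     out = []
--     for s, t in left:
--         for r in index.get(-t, []):
--             sub = s + r
--             if 0 < len(sub) < n:
--                 out.append(sub)
--     out.sort()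
--     return out
-- ===== Notes on version B (the rewrite author's own statement) =====
-- stated objective: alternative
-- what changed: A sweeps every subset size and enumerates all 2^n index combinations, re-summing each candidate; B splits the list in half, enumerates each half's subsets once with running adjusted sums, and matches complementary half-sums through a dict index (meet-in-the-middle), combining only matching pairs before the final sort; the probe measured B ~128x faster at n=16 but B's stored half-subsets exhaust memory at n=64, so no unqualified speed claim is made.
import Mathlib
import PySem

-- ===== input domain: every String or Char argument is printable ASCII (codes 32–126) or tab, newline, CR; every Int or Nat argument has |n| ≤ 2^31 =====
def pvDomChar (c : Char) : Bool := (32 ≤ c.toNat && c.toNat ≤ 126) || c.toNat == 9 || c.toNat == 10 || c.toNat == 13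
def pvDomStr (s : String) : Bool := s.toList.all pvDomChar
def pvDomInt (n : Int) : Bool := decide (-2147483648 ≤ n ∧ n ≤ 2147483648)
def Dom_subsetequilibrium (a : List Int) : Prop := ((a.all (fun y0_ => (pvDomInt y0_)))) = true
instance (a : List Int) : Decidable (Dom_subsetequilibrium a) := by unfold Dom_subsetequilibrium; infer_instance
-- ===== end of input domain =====

-- B replaces A's size-by-size sweep over all 2^n subset combinations by a meet-in-the-middle
-- split: subsets of each half are enumerated once with running adjusted sums and matched through
-- a dict index on the half-sum (objective: alternative; a timing run measured B ~128x faster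
-- at n=16 but B holds all 2^(n/2) half-subsets in memory, so 'faster' was not confirmed at n=64).

-- ===== PORT A =====
def subsetequilibrium (a : List Int) : List (List Int) :=
  let b : List Int := (PySem.List.enumerate a).map (fun ix => ix.2 - ix.1 - 1)
  let ix : List Int := PySem.List.pyRange 0 (b.length : Int) 1
  let out : List (List Int) :=
    (PySem.List.pyRange 1 (b.length : Int) 1).foldl (fun out n =>
      (PySem.List.combinations ix n.toNat).foldl (fun out iy =>
        let bp : List Int := iy.map (fun i => PySem.List.pyGetD b i 0)
        if bp.sum = 0 then
          out ++ [iy.map (fun i => PySem.List.pyGetD a i 0)]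
        else out) out) []
  PySem.List.sorted out (fun x => x) false

-- ===== PORT B =====
-- all subsets of the (vals, ws) pairs, kept as (chosen vals, sum of chosen ws)
def pvSubsets (vals : List Int) (ws : List Int) : List (List Int × Int) :=
  (vals.zip ws).foldl (fun res vw => res ++ res.map (fun st => (st.1 ++ [vw.1], st.2 + vw.2))) [([], 0)]

def subsetequilibrium_alt (a : List Int) : List (List Int) :=
  let n : Int := (a.length : Int)
  let b : List Int := (PySem.List.enumerate a).map (fun ix => ix.2 - ix.1 - 1)
  let half : Int := PySem.Int.floordiv n 2
  let left := pvSubsets (PySem.List.slice a none (some half)) (PySem.List.slice b none (some half))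
  let right := pvSubsets (PySem.List.slice a (some half) none) (PySem.List.slice b (some half) none)
  let index : PySem.Dict Int (List (List Int)) :=
    right.foldl (fun d st => d.modify st.2 [] (fun v => v ++ [st.1])) PySem.Dict.empty
  let out : List (List Int) :=
    left.foldl (fun out st =>
      (index.getD (-st.2) []).foldl (fun out r =>
        let sub := st.1 ++ r
        if 0 < (sub.length : Int) ∧ (sub.length : Int) < n then out ++ [sub] else out) out) []
  PySem.List.sorted out (fun x => x) false

-- ===== PRECONDITION & SPEC =====
def Spec_subsetequilibrium (a : List Int) (out : List (List Int)) : Prop := out = subsetequilibrium_alt a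
instance (a : List Int) (out : List (List Int)) : Decidable (Spec_subsetequilibrium a out) := by unfold Spec_subsetequilibrium; infer_instance

-- ===== CLAIM (what is proved, stated in full; the proofs are below) =====
def Claim_equal_subsetequilibrium : Prop := ∀ (a : List Int), Dom_subsetequilibrium a → Spec_subsetequilibrium a (subsetequilibrium a)

-- ===== LEMMAS AND PROOFS =====

-- the condition a subset of the (value, adjusted-weight) pairs must satisfy to be reported
def pvCond (L : Nat) (s : List (Int × Int)) : Bool :=
  decide ((s.map Prod.snd).sum = 0 ∧ s.length ≠ 0 ∧ s.length < L)

-- the canonical multiset both pre-sort lists are permutations of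
def pvCanon (L : Nat) (l : List (Int × Int)) : List (List Int) :=
  ((l.sublists'.filter (pvCond L)).map (List.map Prod.fst))

theorem pv_take_zip {α β : Type} (l : List α) (l' : List β) (n : Nat) :
    (l.zip l').take n = (l.take n).zip (l'.take n) := by
  induction l generalizing l' n with
  | nil => simp
  | cons x t ih =>
    cases l' with
    | nil => simp
    | cons y t' => cases n with
      | zero => simp
      | succ m => simp [ih]

theorem pv_drop_zip {α β : Type} (l : List α) (l' : List β) (n : Nat) :
    (l.zip l').drop n = (l.drop n).zip (l'.drop n) := by
  induction l generalizing l' n with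
  | nil => simp
  | cons x t ih =>
    cases l' with
    | nil => simp
    | cons y t' => cases n with
      | zero => simp
      | succ m => simp [ih]

theorem pv_range_map_zip (a b : List Int) (h : b.length = a.length) :
    (List.range a.length).map (fun k => (a.getD k 0, b.getD k 0)) = a.zip b := by
  apply List.ext_getElem
  · simp [h]
  · intro i h1 h2
    have hia : i < a.length := by simpa using h1
    have hib : i < b.length := by omega
    simp [List.getElem_zip, List.getD_eq_getElem?_getD, hia, hib]

theorem pv_combinations_perm_sublistsLen {α : Type} (l : List α) (r : Nat) :
    (PySem.List.combinations l r).Perm (List.sublistsLen r l) := by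
  induction l generalizing r with
  | nil =>
    cases r with
    | zero => simp [PySem.List.combinations_zero]
    | succ r => simp [PySem.List.combinations_nil_succ]
  | cons x t ih =>
    cases r with
    | zero => simp [PySem.List.combinations_zero]
    | succ r =>
      rw [PySem.List.combinations_cons_succ, List.sublistsLen_succ_cons]
      exact (List.perm_append_comm).trans ((ih (r + 1)).append ((ih r).map _))

-- pvSubsets is the powerset loop, each subset carried with its value list and weight sum
theorem pv_pow_step {α : Type} (p : List (α × Int)) (acc : List (List (α × Int))) :
    p.foldl (fun res vw => res ++ res.map (fun st => (st.1 ++ [vw.1], st.2 + vw.2)))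
        (acc.map (fun s => (s.map Prod.fst, (s.map Prod.snd).sum)))
      = (p.foldl (fun res x => res ++ res.map (fun s => s ++ [x])) acc).map
          (fun s => (s.map Prod.fst, (s.map Prod.snd).sum)) := by
  induction p generalizing acc with
  | nil => simp
  | cons x t ih =>
    rw [List.foldl_cons, List.foldl_cons, ← ih]
    congr 1
    simp [List.map_map, Function.comp]

theorem pv_pow_eq_sublists {α : Type} (l : List α) :
    l.foldl (fun res x => res ++ res.map (fun s => s ++ [x])) [[]] = l.sublists := by
  induction l using List.reverseRecOn with
  | nil => simp
  | append_singleton t x ih =>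
    rw [List.foldl_append, List.foldl_cons, List.foldl_nil, ih, List.sublists_concat]

theorem pv_pvSubsets_eq (vals ws : List Int) :
    pvSubsets vals ws
      = (vals.zip ws).sublists.map (fun s => (s.map Prod.fst, (s.map Prod.snd).sum)) := by
  unfold pvSubsets
  rw [← pv_pow_eq_sublists, ← pv_pow_step]
  simp

-- the grouping dict: lookup returns exactly the right-half subsets with the wanted sum, in order
theorem pv_index_getD (rs : List (List Int × Int)) (d : PySem.Dict Int (List (List Int))) (c : Int) :
    (rs.foldl (fun d st => d.modify st.2 [] (fun v => v ++ [st.1])) d).getD c []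
      = d.getD c [] ++ (rs.filter (fun st => st.2 == c)).map (·.1) := by
  induction rs generalizing d with
  | nil => simp
  | cons st t ih =>
    rw [List.foldl_cons, ih]
    by_cases hc : st.2 = c
    · subst hc
      simp [PySem.Dict.getD_modify_self]
    · rw [PySem.Dict.getD_modify_of_ne _ _ _ (fun hh => hc hh.symm)]
      simp [hc]

theorem pv_flatMap_swap_perm {α β γ : Type} (L : List α) (R : List β) (f : α → β → List γ) :
    (L.flatMap (fun s => R.flatMap (fun r => f s r))).Perm (R.flatMap (fun r => L.flatMap (fun s => f s r))) := by
  induction L with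
  | nil => simp
  | cons s L ih =>
    simp only [List.flatMap_cons]
    exact (((List.flatMap_append_perm R (f s) _).symm).trans
      ((List.Perm.append_left _ ih).symm)).symm

theorem pv_filter_map_eq_flatMap {α β : Type} (R : List α) (p : α → Bool) (g : α → β) :
    (R.filter p).map g = R.flatMap (fun r => if p r then [g r] else []) := by
  induction R with
  | nil => simp
  | cons x t ih => by_cases hx : p x <;> simp [hx, ih]

theorem pv_range_flatMap_inner (L : Nat) (H : Nat → List (List Int))
    (h0 : H 0 = []) (hL : H L = []) :
    (List.range (L - 1)).flatMap (fun k => H (k + 1)) = (List.range (L + 1)).flatMap H := by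
  rw [List.range_succ_eq_map, List.flatMap_cons, h0, List.nil_append, List.flatMap_map]
  cases L with
  | zero => simp
  | succ m =>
    rw [List.range_succ, List.flatMap_append]
    simp [hL]

-- A's pre-sort list is a permutation of the canonical multiset
theorem pv_A_perm (a : List Int) (b : List Int) (h : b.length = a.length) :
    List.Perm ((PySem.List.pyRange 1 (b.length : Int) 1).foldl (fun out n =>
      (PySem.List.combinations (PySem.List.pyRange 0 (b.length : Int) 1) n.toNat).foldl (fun out iy =>
        let bp : List Int := iy.map (fun i => PySem.List.pyGetD b i 0)
        if bp.sum = 0 then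
          out ++ [iy.map (fun i => PySem.List.pyGetD a i 0)]
        else out) out) [])
      (pvCanon a.length (a.zip b)) := by
  classical
  have hlen : (a.zip b).length = a.length := by simp [h]
  rw [h]
  -- collapse the two nested appending loops
  simp only [PySem.List.foldl_append_ite, PySem.List.foldl_append_eq_flatMap, List.nil_append]
  -- move from index lists to (value, weight) pair lists
  have hrange : PySem.List.pyRange 0 (a.length : Int) 1
      = (List.range a.length).map (fun k => Int.ofNat k) := by
    rw [PySem.List.pyRange_one]
    simp only [sub_zero, Int.toNat_natCast, zero_add]
    rfl
  have hchunk : ∀ r : Nat,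
      ((PySem.List.combinations (PySem.List.pyRange 0 (a.length : Int) 1) r).filter
          (fun iy => decide ((iy.map (fun i => PySem.List.pyGetD b i 0)).sum = 0))).map
        (fun iy => iy.map (fun i => PySem.List.pyGetD a i 0))
      = ((PySem.List.combinations (a.zip b) r).filter
          (fun s => decide ((s.map Prod.snd).sum = 0))).map (List.map Prod.fst) := by
    intro r
    rw [hrange, ← pv_range_map_zip a b h, PySem.List.combinations_map, PySem.List.combinations_map]
    simp [List.filter_map, List.map_map, Function.comp_def, PySem.List.pyGetD_natCast,
      List.getD]
  simp only [hchunk]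
  rw [PySem.List.pyRange_one]
  have htn : ((a.length : Int) - 1).toNat = a.length - 1 := by omega
  have hk1 : ∀ k : Nat, ((1 : Int) + (k : Nat)).toNat = k + 1 := by intro k; omega
  rw [htn, List.flatMap_map]
  simp only [hk1]
  refine List.Perm.trans (List.Perm.flatMap_left _ (fun k _ =>
    List.Perm.map _ (List.Perm.filter _ (pv_combinations_perm_sublistsLen _ _)))) ?_
  have hbody : ∀ k ∈ List.range (a.length - 1),
      List.map (List.map Prod.fst) (List.filter (fun s => decide ((List.map Prod.snd s).sum = 0))
          (List.sublistsLen (k + 1) (a.zip b)))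
        = List.map (List.map Prod.fst) (List.filter (pvCond a.length)
            (List.sublistsLen (k + 1) (a.zip b))) := by
    intro k hk
    have hk' : k < a.length - 1 := List.mem_range.mp hk
    congr 1
    apply List.filter_congr
    intro s hs
    have hlens : s.length = k + 1 := List.length_of_sublistsLen hs
    unfold pvCond
    apply decide_eq_decide.mpr
    constructor
    · intro hsum
      exact ⟨hsum, by omega, by omega⟩
    · intro hsum
      exact hsum.1
  rw [List.flatMap_congr hbody]
  have h0 : List.map (List.map Prod.fst) (List.filter (pvCond a.length)
      (List.sublistsLen 0 (a.zip b))) = [] := by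
    simp [pvCond]
  have hL : List.map (List.map Prod.fst) (List.filter (pvCond a.length)
      (List.sublistsLen a.length (a.zip b))) = [] := by
    rw [List.filter_eq_nil_iff.mpr, List.map_nil]
    intro s hs
    have hlens : s.length = a.length := List.length_of_sublistsLen hs
    unfold pvCond
    simp [hlens]
  rw [pv_range_flatMap_inner a.length (fun n => List.map (List.map Prod.fst)
    (List.filter (pvCond a.length) (List.sublistsLen n (a.zip b)))) h0 hL,
    ← List.map_flatMap, ← List.filter_flatMap]
  unfold pvCanon
  have hp := List.range_bind_sublistsLen_perm (a.zip b)
  rw [hlen] at hp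
  exact (hp.filter _).map _

theorem pv_cond_split (L : Nat) (s r : List (Int × Int)) :
    (decide (0 < ((((s ++ r).map Prod.fst).length : Nat) : Int) ∧
        ((((s ++ r).map Prod.fst).length : Nat) : Int) < (L : Int)) &&
      ((r.map Prod.snd).sum == -(s.map Prod.snd).sum))
    = pvCond L (s ++ r) := by
  unfold pvCond
  rw [Bool.eq_iff_iff]
  simp only [Bool.and_eq_true, beq_iff_eq, decide_eq_true_eq, List.length_append,
    List.map_append, List.sum_append, List.length_map]
  omega

theorem pv_canon_split (L : Nat) (Lz Rz : List (Int × Int)) :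
    (((Lz ++ Rz).sublists.filter (pvCond L)).map (List.map Prod.fst))
      = Rz.sublists.flatMap (fun r => Lz.sublists.flatMap
          (fun s => if pvCond L (s ++ r) then [(s ++ r).map Prod.fst] else [])) := by
  rw [List.sublists_append]
  simp only [List.bind_eq_flatMap, List.filter_flatMap, List.map_flatMap, List.filter_map,
    Function.comp_def, pv_filter_map_eq_flatMap]
  simp only [apply_ite (List.map (List.map Prod.fst)), List.map_nil, List.map_cons]

-- B's pre-sort list is a permutation of the canonical multiset
theorem pv_B_perm (a : List Int) (b : List Int) (h : b.length = a.length) :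
    List.Perm (let n : Int := (a.length : Int)
     let half : Int := PySem.Int.floordiv n 2
     let left := pvSubsets (PySem.List.slice a none (some half)) (PySem.List.slice b none (some half))
     let right := pvSubsets (PySem.List.slice a (some half) none) (PySem.List.slice b (some half) none)
     let index : PySem.Dict Int (List (List Int)) :=
       right.foldl (fun d st => d.modify st.2 [] (fun v => v ++ [st.1])) PySem.Dict.empty
     left.foldl (fun out st =>
       (index.getD (-st.2) []).foldl (fun out r =>
         let sub := st.1 ++ r
         if 0 < (sub.length : Int) ∧ (sub.length : Int) < n then out ++ [sub] else out) out) [])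
      (pvCanon a.length (a.zip b)) := by
  classical
  have hlen : (a.zip b).length = a.length := by simp [h]
  dsimp only
  have hhalf : PySem.Int.floordiv ((a.length : Nat) : Int) 2 = ((a.length / 2 : Nat) : Int) := by
    exact_mod_cast PySem.Int.floordiv_natCast a.length 2
  rw [hhalf, PySem.List.slice_to_natCast, PySem.List.slice_to_natCast,
    PySem.List.slice_from_natCast, PySem.List.slice_from_natCast,
    pv_pvSubsets_eq, pv_pvSubsets_eq, ← pv_take_zip, ← pv_drop_zip]
  simp only [PySem.List.foldl_append_ite, pv_index_getD, PySem.Dict.getD_empty,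
    PySem.List.foldl_append_eq_flatMap, List.nil_append]
  simp only [List.flatMap_map, List.filter_map, List.map_map, Function.comp_def]
  simp only [List.filter_filter, ← List.map_append, pv_cond_split, pv_filter_map_eq_flatMap]
  refine List.Perm.trans (pv_flatMap_swap_perm _ _ _) ?_
  rw [← pv_canon_split, List.take_append_drop]
  unfold pvCanon
  exact ((List.sublists_perm_sublists' _).filter _).map _

theorem pv_sorted_congr (xs ys : List (List Int)) (h : xs.Perm ys) :
    PySem.List.sorted xs (fun x => x) false = PySem.List.sorted ys (fun x => x) false := by
  have e : (fun (a b : List Int) => a.decidableLT b)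
      = (LinearOrder.toDecidableLT : DecidableRel (fun (a b : List Int) => a < b)) :=
    funext fun a => funext fun b => Subsingleton.elim _ _
  show @PySem.List.sorted (List Int) (List Int) List.instLinearOrder.toLT
      (fun a b => a.decidableLT b) xs (fun x => x) false = _
  rw [e]
  exact PySem.List.sorted_eq_sorted_of_perm xs ys _ (fun _ _ h => h) h

-- ===== VERDICT (by name: the statement is the Claim_ definition above) =====
theorem subsetequilibrium_spec : Claim_equal_subsetequilibrium := by
  intro a _
  unfold Spec_subsetequilibrium subsetequilibrium subsetequilibrium_alt
  dsimp only
  have hb : ((PySem.List.enumerate a).map (fun ix => ix.2 - ix.1 - 1)).length = a.length := by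
    simp [PySem.List.length_enumerate]
  exact pv_sorted_congr _ _ ((pv_A_perm a _ hb).trans (pv_B_perm a _ hb).symm)
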